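-- pv_equiv track=rewrite | github.com/austenjs/CS3245 | HW2/queryEvaluator.py | _create_skip_pointers
-- ===== SOURCE A (Python) =====
-- from math import sqrt
-- from typing import List
--
-- def _create_skip_pointers(posting_list) -> List[int]:
--     '''
--     Convert the element of the posting list into tuple that has format of
--     (docId, nextValue, nextIndex)
--
--     Argument:
--     posting_list (List[int]): A posting list
--
--     Return:
--     A posting list with skip pointers
--     '''
--     skip_jump = int(sqrt(len(posting_list)))
--     length = len(posting_list)
--     new_posting_list = []
--
--     for i in range(length):
--         if i % skip_jump == 0 and i + skip_jump < length:
--             new_posting_list.append((posting_list[i], posting_list[i + skip_jump], i + skip_jump))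
--         else:
--             new_posting_list.append((posting_list[i], None, None))
--
--     return new_posting_list
-- ===== SOURCE B (Python) =====
-- from math import sqrt
--
-- def _create_skip_pointers(posting_list):
--     length = len(posting_list)
--     new_posting_list = [(doc, None, None) for doc in posting_list]
--     if length == 0:
--         return new_posting_list
--     skip_jump = int(sqrt(length))
--     for i in range(0, length - skip_jump, skip_jump):
--         new_posting_list[i] = (posting_list[i], posting_list[i + skip_jump], i + skip_jump)
--     return new_posting_list
-- ===== Notes on version B (the rewrite author's own statement) =====
-- stated objective: alternative
-- what changed: A tests every index with a modulo condition inside one append loop; B first builds the whole list as a map producing (doc, None, None) and then makes a second strided pass over exactly the skip positions (range(0, length-skip, skip)), overwriting those entries in place.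
import Mathlib
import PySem

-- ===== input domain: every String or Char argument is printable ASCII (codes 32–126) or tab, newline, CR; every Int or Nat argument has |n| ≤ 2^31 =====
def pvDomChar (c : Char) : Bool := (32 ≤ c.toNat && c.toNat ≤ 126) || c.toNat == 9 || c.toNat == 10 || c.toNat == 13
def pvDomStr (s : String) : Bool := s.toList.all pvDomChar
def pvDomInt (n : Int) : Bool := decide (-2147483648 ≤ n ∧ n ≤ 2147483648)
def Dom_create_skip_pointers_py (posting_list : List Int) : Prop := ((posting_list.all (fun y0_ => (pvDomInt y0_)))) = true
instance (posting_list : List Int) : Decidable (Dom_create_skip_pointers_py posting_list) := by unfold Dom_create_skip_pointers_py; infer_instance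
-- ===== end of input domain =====

-- B replaces A's per-index modulo test by a base map pass plus a strided overwrite pass
-- over exactly the skip positions (objective: alternative decomposition, no speed claim).


-- ===== PORT A =====
-- int(sqrt(n)) ported as Nat.sqrt n: exact for every feasible list length (float sqrt is
-- exact on these magnitudes).  posting_list[i] ported as pyGetD with default 0: every read
-- is at an in-range nonnegative index, where pyGetD equals Python indexing.
def create_skip_pointers_py (posting_list : List Int) : List (Int × Option Int × Option Int) :=
  let skip_jump : Int := (Nat.sqrt posting_list.length : Int)
  let length : Int := (posting_list.length : Int)
  (PySem.List.pyRange 0 length 1).foldl (fun new_posting_list i =>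
    if PySem.Int.mod i skip_jump = 0 ∧ i + skip_jump < length then
      -- Python's 'i % skip_jump' has skip_jump ≠ 0 whenever the loop body runs (length > 0)
      new_posting_list ++ [(PySem.List.pyGetD posting_list i 0,
        some (PySem.List.pyGetD posting_list (i + skip_jump) 0), some (i + skip_jump))]
    else
      new_posting_list ++ [(PySem.List.pyGetD posting_list i 0, none, none)]) []

-- ===== PORT B =====
def create_skip_pointers_py_alt (posting_list : List Int) : List (Int × Option Int × Option Int) :=
  let length : Int := (posting_list.length : Int)
  let base := posting_list.map (fun doc => (doc, (none : Option Int), (none : Option Int)))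
  if length = 0 then base
  else
    let skip_jump : Int := (Nat.sqrt posting_list.length : Int)
    (PySem.List.pyRange 0 (length - skip_jump) skip_jump).foldl
      (fun acc i => acc.set i.toNat (PySem.List.pyGetD posting_list i 0,
        some (PySem.List.pyGetD posting_list (i + skip_jump) 0), some (i + skip_jump))) base

-- ===== PRECONDITION & SPEC =====
def Spec_create_skip_pointers_py (posting_list : List Int) (out : List (Int × Option Int × Option Int)) : Prop := out = create_skip_pointers_py_alt posting_list
instance (posting_list : List Int) (out : List (Int × Option Int × Option Int)) : Decidable (Spec_create_skip_pointers_py posting_list out) := by unfold Spec_create_skip_pointers_py; infer_instance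

-- ===== CLAIM (what is proved, stated in full; the proofs are below) =====
def Claim_equal_create_skip_pointers_py : Prop := ∀ (posting_list : List Int), Dom_create_skip_pointers_py posting_list → Spec_create_skip_pointers_py posting_list (create_skip_pointers_py posting_list)

-- ===== LEMMAS AND PROOFS =====

-- A's loop: append of an if-then-else builds the map of the if-then-else
theorem foldl_ite_append {α β : Type} (c : α → Prop) [DecidablePred c] (u v : α → β) :
    ∀ (l : List α) (acc : List β),
      l.foldl (fun acc x => if c x then acc ++ [u x] else acc ++ [v x]) acc
        = acc ++ l.map (fun x => if c x then u x else v x) := by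
  intro l
  induction l with
  | nil => intro acc; simp
  | cons x t ih =>
    intro acc
    rw [List.foldl_cons, List.map_cons]
    by_cases hc : c x
    · rw [if_pos hc, if_pos hc, ih]; simp
    · rw [if_neg hc, if_neg hc, ih]; simp

-- B's loop: a foldl of List.set at nonnegative in-range Int indices, writing a value that
-- depends only on the index, has element j?  =  the written value when some index denotes j
theorem foldl_set_getElem? {α : Type} (f : Int → α) :
    ∀ (idxs : List Int) (res : List α) (j : Nat),
      (∀ i ∈ idxs, 0 ≤ i ∧ i.toNat < res.length) →
      (idxs.foldl (fun acc i => acc.set i.toNat (f i)) res)[j]? =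
        if ((j : Int) ∈ idxs) then some (f (j : Int)) else res[j]? := by
  intro idxs
  induction idxs with
  | nil => intro res j _; simp
  | cons i rest ih =>
    intro res j hok
    have h0 := hok i (List.mem_cons_self ..)
    rw [List.foldl_cons, ih (res.set i.toNat (f i)) j
      (fun x hx => by simpa using hok x (List.mem_cons_of_mem _ hx))]
    by_cases hm : (j : Int) ∈ rest
    · simp [hm]
    · by_cases he : i = (j : Int)
      · subst he
        have hlt : j < res.length := by simpa using h0.2
        simp [hm, hlt]
      · have hne : ¬ (i.toNat = j) := fun h => he (by omega)
        have he' : ¬ ((j : Int) = i) := fun h => he h.symm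
        simp [hm, hne, he']

theorem create_skip_pointers_py_eq (xs : List Int) :
    create_skip_pointers_py xs = create_skip_pointers_py_alt xs := by
  rcases xs with _ | ⟨d, tl⟩
  · rfl
  set xs := d :: tl with hxs
  have hn : 0 < xs.length := by simp [hxs]
  set n : Nat := xs.length with hnlen
  set k : Nat := Nat.sqrt n with hk
  have hkpos : 0 < k := by
    have := Nat.sqrt_pos.mpr hn
    omega
  have hkn : k ≤ n := by
    have := Nat.sqrt_le_self n
    omega
  -- the value written / kept at index i
  have hA : create_skip_pointers_py xs =
      [] ++ (PySem.List.pyRange 0 (n : Int) 1).map (fun i =>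
        if PySem.Int.mod i (k : Int) = 0 ∧ i + (k : Int) < (n : Int) then
          (PySem.List.pyGetD xs i 0,
            some (PySem.List.pyGetD xs (i + (k : Int)) 0), some (i + (k : Int)))
        else (PySem.List.pyGetD xs i 0, none, none)) := by
    exact foldl_ite_append
      (fun i => PySem.Int.mod i (k : Int) = 0 ∧ i + (k : Int) < (n : Int))
      (fun i => (PySem.List.pyGetD xs i 0,
        some (PySem.List.pyGetD xs (i + (k : Int)) 0), some (i + (k : Int))))
      (fun i => (PySem.List.pyGetD xs i 0, none, none)) _ []
  have hB : create_skip_pointers_py_alt xs =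
      (PySem.List.pyRange 0 ((n : Int) - (k : Int)) (k : Int)).foldl
        (fun acc i => acc.set i.toNat (PySem.List.pyGetD xs i 0,
          some (PySem.List.pyGetD xs (i + (k : Int)) 0), some (i + (k : Int))))
        (xs.map (fun doc => (doc, (none : Option Int), (none : Option Int)))) := by
    have hn0' : n ≠ 0 := by omega
    unfold create_skip_pointers_py_alt
    simp [← hnlen, ← hk, hn0']
  rw [hA, hB, List.nil_append, PySem.List.pyRange_zero_natCast]
  have hok : ∀ i ∈ PySem.List.pyRange 0 ((n : Int) - (k : Int)) (k : Int),
      0 ≤ i ∧ i.toNat < (xs.map (fun doc => (doc, (none : Option Int), (none : Option Int)))).length := by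
    intro i hi
    have h := (PySem.List.mem_pyRange_iff_of_pos (by exact_mod_cast hkpos) i).mp hi
    refine ⟨h.1, ?_⟩
    rw [List.length_map, ← hnlen]
    omega
  apply List.ext_getElem?
  intro j
  by_cases hjn : j < n
  · rw [List.getElem?_map, List.getElem?_map, List.getElem?_range hjn,
      Option.map_some, Option.map_some, foldl_set_getElem? _ _ _ j hok]
    have hmem : ((j : Int) ∈ PySem.List.pyRange 0 ((n : Int) - (k : Int)) (k : Int)) ↔
        (PySem.Int.mod (j : Int) (k : Int) = 0 ∧ (j : Int) + (k : Int) < (n : Int)) := by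
      rw [PySem.List.mem_pyRange_iff_of_pos (by exact_mod_cast hkpos),
        PySem.Int.mod_eq_zero_iff_dvd]
      constructor
      · rintro ⟨-, h2, h3⟩; exact ⟨by simpa using h3, by omega⟩
      · rintro ⟨h1, h2⟩
        exact ⟨by positivity, by omega, by simpa using h1⟩
    by_cases hc : PySem.Int.mod (j : Int) (k : Int) = 0 ∧ (j : Int) + (k : Int) < (n : Int)
    · rw [if_pos hc, if_pos (hmem.mpr hc)]
    · rw [if_neg hc, if_neg (fun h => hc (hmem.mp h))]
      rw [List.getElem?_map]
      have hjx : j < xs.length := by omega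
      rw [List.getElem?_eq_getElem hjx, Option.map_some,
        PySem.List.pyGetD_eq_getElem xs 0 (by positivity) (by exact_mod_cast hjn)]
      simp
  · have h1 : n ≤ j := Nat.le_of_not_lt hjn
    rw [List.getElem?_eq_none (by simpa using h1)]
    have hmemn : ¬ ((j : Int) ∈ PySem.List.pyRange 0 ((n : Int) - (k : Int)) (k : Int)) := by
      intro hmem
      have h := (PySem.List.mem_pyRange_iff_of_pos (by exact_mod_cast hkpos) (j : Int)).mp hmem
      omega
    rw [foldl_set_getElem? _ _ _ j hok, if_neg hmemn,
      List.getElem?_eq_none (by rw [List.length_map, ← hnlen]; omega)]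

-- ===== VERDICT (by name: the statement is the Claim_ definition above) =====
theorem create_skip_pointers_py_spec : Claim_equal_create_skip_pointers_py := by
  intro posting_list _
  exact create_skip_pointers_py_eq posting_list
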